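-- pv_equiv track=rewrite | github.com/wwwzrb/MLoRa | LoRa_Pre_test_new(KangjieXu).py | get_max_bins
-- ===== SOURCE A (Python) =====
-- def get_max_bins(content, scope, num):
--     curr_peaks = {}
--     for idx in range(len(content)):
--         peak_found = True
--         for jdx in range(-scope, scope + 1):
--             if content[idx] < content[(idx + jdx) % len(content)]:
--                 peak_found = False
--                 break
--         if peak_found:
--             curr_peaks[idx] = content[idx]
--         # if(content[idx] > content[(idx-1) % len(content)]) and (content[idx] > content[(idx+1) % len(content)]):
--         #     curr_peaks[idx] = content[idx]
--
--     # while len(curr_peaks) < 3: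
--     temp_cnt = -1
--     # 字典键值还是不能相同
--     while len(curr_peaks) < num:
--         curr_peaks.update({temp_cnt: 0})
--         temp_cnt -= 1
--     sorted_peaks = sorted(curr_peaks.items(), key=lambda kv: kv[1])
--     max_idx = [sorted_peaks[-idx][0] for idx in range(1, num + 1)]
--     max_bin = [sorted_peaks[-idx][1] for idx in range(1, num + 1)]
--     # max_peaks = [(sorted_peaks[-idx][0], sorted_peaks[-idx][1]) for idx in range(3)]
--
--     return max_idx, max_bin
-- ===== SOURCE B (Python) =====
-- # Block-decomposition sliding-window maxima over the circularly extended array: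
-- # O(n) peak detection instead of A's O(n*scope) inner rescan.
-- def get_max_bins(content, scope, num):
--     n = len(content)
--     if n == 0 or scope < 0:
--         peaks = list(enumerate(content))
--     elif 2 * scope + 1 >= n:
--         # window covers the whole circular array: peaks are the global maxima
--         mx = max(content)
--         peaks = [(i, v) for i, v in enumerate(content) if v >= mx]
--     else:
--         w = 2 * scope + 1
--         ext = [content[(t - scope) % n] for t in range(n + 2 * scope)]
--         m = len(ext)
--         left = ext[:]
--         for i in range(1, m):
--             if i % w:
--                 left[i] = max(left[i - 1], ext[i])
--         right = ext[:]
--         for i in range(m - 2, -1, -1):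
--             if (i + 1) % w:
--                 right[i] = max(right[i + 1], ext[i])
--         peaks = [(i, v) for i, v in enumerate(content)
--                  if v >= max(right[i], left[i + w - 1])]
--     pad = num - len(peaks)
--     items = peaks + [(-t, 0) for t in range(1, pad + 1)]
--     top = sorted(items, key=lambda kv: kv[1])[::-1][:max(0, num)]
--     return [kv[0] for kv in top], [kv[1] for kv in top]
-- ===== Notes on version B (the rewrite author's own statement) =====
-- stated objective: faster
-- what changed: Peak detection is redone as O(n) sliding-window maxima by block decomposition (prefix/suffix running maxima over the circularly extended array), with a global-max shortcut when the window covers the whole array, instead of A's O(n*scope) rescan of the full window per index; the dict plus padding while-loop becomes a direct list build and the top-num selection takes a prefix of the reversed sorted list instead of indexing with negative offsets.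
import Mathlib
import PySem

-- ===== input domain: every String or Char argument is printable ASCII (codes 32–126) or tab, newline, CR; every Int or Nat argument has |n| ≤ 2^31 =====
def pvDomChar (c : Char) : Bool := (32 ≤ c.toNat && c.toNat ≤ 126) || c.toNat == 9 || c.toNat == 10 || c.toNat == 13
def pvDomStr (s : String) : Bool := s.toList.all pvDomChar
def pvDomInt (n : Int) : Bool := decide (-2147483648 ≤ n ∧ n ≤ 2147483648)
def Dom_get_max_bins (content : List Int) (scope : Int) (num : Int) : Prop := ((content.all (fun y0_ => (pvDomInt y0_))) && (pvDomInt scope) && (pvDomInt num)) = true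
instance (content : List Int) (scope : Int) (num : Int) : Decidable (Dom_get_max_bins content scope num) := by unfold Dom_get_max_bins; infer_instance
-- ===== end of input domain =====

-- B replaces A's O(n*scope) circular window rescan per index by O(n) block-decomposition
-- sliding-window maxima over the circularly extended array (objective: faster worst case).


-- ===== PORT A =====
-- inner 'for jdx in range(-scope, scope+1)' loop with its break; returns peak_found
def gmbCheck (content : List Int) (idx : Int) : List Int → Bool
  | [] => true
  | jdx :: rest =>
    if PySem.List.pyGetD content idx 0 <
       PySem.List.pyGetD content (PySem.Int.mod (idx + jdx) (PySem.List.len content)) 0 then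
      false
    else gmbCheck content idx rest

-- 'while len(curr_peaks) < num' padding loop; each pass inserts a FRESH key, so it runs
-- exactly (num - len).toNat times — that count is passed as fuel, the loop's own test is kept
def gmbPad (num : Int) : PySem.Dict Int Int → Int → Nat → PySem.Dict Int Int
  | d, _, 0 => d
  | d, t, fuel+1 =>
    if (d.size : Int) < num then gmbPad num (d.insert t 0) (t - 1) fuel else d

def get_max_bins (content : List Int) (scope : Int) (num : Int) : List Int × List Int :=
  let currPeaks : PySem.Dict Int Int :=
    (PySem.List.pyRange 0 (PySem.List.len content) 1).foldl
      (fun d idx =>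
        if gmbCheck content idx (PySem.List.pyRange (-scope) (scope + 1) 1) then
          d.insert idx (PySem.List.pyGetD content idx 0)
        else d)
      PySem.Dict.empty
  let padded := gmbPad num currPeaks (-1) (num - (currPeaks.size : Int)).toNat
  let sortedPeaks := PySem.List.sorted padded.items (fun kv => kv.2) false
  -- sorted_peaks[-idx] is always in range (the padding guarantees num ≤ len); default never read
  let maxIdx := (PySem.List.pyRange 1 (num + 1) 1).map
      (fun i => (PySem.List.pyGetD sortedPeaks (-i) ((0 : Int), (0 : Int))).1)
  let maxBin := (PySem.List.pyRange 1 (num + 1) 1).map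
      (fun i => (PySem.List.pyGetD sortedPeaks (-i) ((0 : Int), (0 : Int))).2)
  (maxIdx, maxBin)

-- ===== PORT B =====
def get_max_bins_alt (content : List Int) (scope : Int) (num : Int) : List Int × List Int :=
  let n := PySem.List.len content
  let peaks : List (Int × Int) :=
    if n = 0 ∨ scope < 0 then PySem.List.enumerate content 0
    else if 2 * scope + 1 ≥ n then
      -- window covers the whole circular array: peaks are the global maxima
      -- (max(content): the n ≠ 0 guard makes max? a some; the default is never read)
      let mx := (PySem.List.max? content (fun x => x)).getD 0
      (PySem.List.enumerate content 0).filter (fun p => decide (mx ≤ p.2))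
    else
      let w := 2 * scope + 1
      let ext := (PySem.List.pyRange 0 (n + 2 * scope) 1).map
        (fun t => PySem.List.pyGetD content (PySem.Int.mod (t - scope) n) 0)
      let m := PySem.List.len ext
      let left := (PySem.List.pyRange 1 m 1).foldl
        (fun l i => if PySem.Int.mod i w ≠ 0 then
            PySem.List.pySetD l i (max (PySem.List.pyGetD l (i - 1) 0) (PySem.List.pyGetD ext i 0))
          else l) ext
      let right := (PySem.List.pyRange (m - 2) (-1) (-1)).foldl
        (fun r i => if PySem.Int.mod (i + 1) w ≠ 0 then
            PySem.List.pySetD r i (max (PySem.List.pyGetD r (i + 1) 0) (PySem.List.pyGetD ext i 0))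
          else r) ext
      (PySem.List.enumerate content 0).filter
        (fun p => decide (max (PySem.List.pyGetD right p.1 0)
                              (PySem.List.pyGetD left (p.1 + w - 1) 0) ≤ p.2))
  let pad := num - PySem.List.len peaks
  let items := peaks ++ (PySem.List.pyRange 1 (pad + 1) 1).map (fun t => (-t, (0 : Int)))
  -- sorted(...)[::-1] : [::-1] is List.reverse (PySem.List.slice?_none_none_neg_one)
  let sp := (PySem.List.sorted items (fun kv => kv.2) false).reverse
  let top := PySem.List.slice sp none (some (max 0 num))
  (top.map Prod.fst, top.map Prod.snd)



-- ===== PRECONDITION & SPEC =====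
def Spec_get_max_bins (content : List Int) (scope : Int) (num : Int) (out : List Int × List Int) : Prop := out = get_max_bins_alt content scope num
instance (content : List Int) (scope : Int) (num : Int) (out : List Int × List Int) : Decidable (Spec_get_max_bins content scope num out) := by unfold Spec_get_max_bins; infer_instance

-- ===== CLAIM (what is proved, stated in full; the proofs are below) =====
def Claim_equal_get_max_bins : Prop := ∀ (content : List Int) (scope : Int) (num : Int), Dom_get_max_bins content scope num → Spec_get_max_bins content scope num (get_max_bins content scope num)

-- ===== LEMMAS AND PROOFS =====

def segMax (e : Nat → Int) (a : Nat) : Nat → Int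
  | 0 => e a
  | k+1 => max (segMax e a k) (e (a+k+1))

def leftSpec (e : Nat → Int) (w : Nat) : Nat → Int
  | 0 => e 0
  | i+1 => if (i+1) % w ≠ 0 then max (leftSpec e w i) (e (i+1)) else e (i+1)

def rightSpecG (e : Nat → Int) (w m : Nat) : Nat → Int
  | 0 => e (m-1)
  | g+1 => if (m-1-g) % w ≠ 0 then max (rightSpecG e w m g) (e (m-2-g)) else e (m-2-g)

def rightSpec (e : Nat → Int) (w m j : Nat) : Int := rightSpecG e w m (m-1-j)

theorem segMax_le_iff (e : Nat → Int) (a : Nat) (k : Nat) (c : Int) :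
    segMax e a k ≤ c ↔ ∀ j, a ≤ j → j ≤ a + k → e j ≤ c := by
  induction k with
  | zero =>
    constructor
    · intro h j h1 h2
      have hja : j = a := by omega
      rw [hja]; exact h
    · intro h; exact h a le_rfl (by omega)
  | succ k ih =>
    simp only [segMax, max_le_iff, ih]
    constructor
    · rintro ⟨h1, h2⟩ j hj1 hj2
      rcases Nat.lt_or_ge j (a+k+1) with h | h
      · exact h1 j hj1 (by omega)
      · have : j = a+k+1 := by omega
        rw [this]; exact h2
    · intro h
      exact ⟨fun j h1 h2 => h j h1 (by omega), h _ (by omega) (by omega)⟩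

theorem segMax_cons (e : Nat → Int) (a : Nat) (k : Nat) :
    segMax e a (k+1) = max (e a) (segMax e (a+1) k) := by
  induction k with
  | zero =>
    show max (e a) (e (a+0+1)) = max (e a) (e (a+1))
    norm_num
  | succ k ih =>
    show max (segMax e a (k+1)) (e (a+(k+1)+1)) = max (e a) (max (segMax e (a+1) k) (e (a+1+k+1)))
    rw [ih, max_assoc]
    congr 3
    omega

theorem succ_mod_ne (w i : Nat) (h : (i+1) % w ≠ 0) : (i+1) % w = i % w + 1 := by
  rcases Nat.eq_zero_or_pos w with hw | hw
  · subst hw; simp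
  rcases Nat.lt_or_ge (i % w + 1) w with hlt | hge
  · conv_lhs => rw [← Nat.div_add_mod i w]
    rw [Nat.add_assoc, Nat.mul_add_mod]
    exact Nat.mod_eq_of_lt hlt
  · exfalso
    have h1 : i % w < w := Nat.mod_lt _ hw
    have h2 : i % w + 1 = w := by omega
    apply h
    conv_lhs => rw [← Nat.div_add_mod i w, Nat.add_assoc, h2]
    rw [Nat.mul_add_mod]
    simp

theorem succ_mod_eq (w i : Nat) (hw : 0 < w) (h : (i+1) % w = 0) : i % w = w - 1 := by
  by_contra hne
  have h1 : i % w < w := Nat.mod_lt _ hw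
  have : (i+1) % w = i % w + 1 := by
    conv_lhs => rw [← Nat.div_add_mod i w, Nat.add_assoc, Nat.mul_add_mod]
    exact Nat.mod_eq_of_lt (by omega)
  omega

theorem shift_mod (w s : Nat) (hw : 0 < w) :
    (s + w - 1) % w = if s % w = 0 then w - 1 else s % w - 1 := by
  split_ifs with h
  · have hdvd : w ∣ s := Nat.dvd_of_mod_eq_zero h
    obtain ⟨q, rfl⟩ := hdvd
    have he : w * q + w - 1 = (w - 1) + q * w := by
      rw [Nat.mul_comm w q]; omega
    rw [he, Nat.add_mul_mod_self_right]
    exact Nat.mod_eq_of_lt (by omega)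
  · have hs1 : 1 ≤ s % w := by omega
    have hs : 1 ≤ s := by
      by_contra hc
      have hz : s = 0 := by omega
      rw [hz] at hs1; simp at hs1
    have h1 : s + w - 1 = (s - 1) + w := by omega
    rw [h1, Nat.add_mod_right]
    have hq := Nat.div_add_mod s w
    have h2 : s - 1 = (s % w - 1) + w * (s / w) := by omega
    rw [h2, Nat.add_mul_mod_self_left]
    exact Nat.mod_eq_of_lt (by have := Nat.mod_lt s hw; omega)

theorem leftSpec_eq_segMax (e : Nat → Int) (w i : Nat) :
    leftSpec e w i = segMax e (i - i % w) (i % w) := by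
  induction i with
  | zero => simp [leftSpec, segMax]
  | succ i ih =>
    by_cases h : (i+1) % w = 0
    · simp [leftSpec, h, segMax]
    · have hmod := succ_mod_ne w i h
      have hle : i % w ≤ i := Nat.mod_le _ _
      simp only [leftSpec, ih, hmod]
      rw [if_pos (by omega : ¬ i % w + 1 = 0)]
      have h1 : i + 1 - (i % w + 1) = i - i % w := by omega
      rw [h1]
      show _ = max (segMax e (i - i % w) (i % w)) (e (i - i % w + i % w + 1))
      congr 2
      omega

theorem rightSpecG_eq (e : Nat → Int) (w m : Nat) (hw : 0 < w) (hm : 0 < m) :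
    ∀ g, g ≤ m-1 →
      rightSpecG e w m g =
        segMax e (m-1-g) (min (m-1) ((m-1-g) + (w-1) - (m-1-g) % w) - (m-1-g)) := by
  intro g
  induction g with
  | zero =>
    intro _
    have hmod : (m-1) % w ≤ w - 1 := by have := Nat.mod_lt (m-1) hw; omega
    have hmin : min (m-1) ((m-1-0) + (w-1) - (m-1-0) % w) = m-1 := by
      simp only [Nat.sub_zero]; omega
    simp only [Nat.sub_zero] at hmin ⊢
    rw [hmin, Nat.sub_self]
    rfl
  | succ g ih =>
    intro hg
    set j := m-2-g with hj
    have hj1 : m-1-(g+1) = j := by omega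
    have hjs : m-1-g = j+1 := by omega
    show (if (m-1-g) % w ≠ 0 then max (rightSpecG e w m g) (e (m-2-g)) else e (m-2-g)) = _
    rw [hjs, hj1, ← hj]
    by_cases h : (j+1) % w = 0
    · rw [if_neg (by simpa using h)]
      have hr : j % w = w - 1 := succ_mod_eq w j hw h
      have : min (m-1) (j + (w-1) - j % w) = j := by
        rw [hr]; omega
      rw [this, Nat.sub_self]
      rfl
    · rw [if_pos (by simpa using h)]
      have hmod := succ_mod_ne w j h
      have hr : j % w < w := Nat.mod_lt _ hw
      have hrlt : j % w + 1 < w := by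
        have := Nat.mod_lt (j+1) hw; omega
      rw [ih (by omega), hjs, hmod]
      have hB : (j+1) + (w-1) - (j % w + 1) = j + (w-1) - j % w := by omega
      rw [hB]
      have hmin1 : j + 1 ≤ min (m-1) (j + (w-1) - j % w) := by
        have h1 : j + 1 ≤ m - 1 := by omega
        have h2 : j + 1 ≤ j + (w-1) - j % w := by omega
        omega
      have hk : min (m-1) (j + (w-1) - j % w) - j
              = (min (m-1) (j + (w-1) - j % w) - (j+1)) + 1 := by omega
      rw [hk, segMax_cons, max_comm]

theorem rightSpec_eq_segMax (e : Nat → Int) (w m j : Nat) (hw : 0 < w) (hm : 0 < m)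
    (hj : j ≤ m-1) :
    rightSpec e w m j = segMax e j (min (m-1) (j + (w-1) - j % w) - j) := by
  have := rightSpecG_eq e w m hw hm (m-1-j) (by omega)
  have hjj : m-1-(m-1-j) = j := by omega
  rw [hjj] at this
  exact this

theorem window_le_iff (e : Nat → Int) (w m s : Nat) (c : Int) (hw : 0 < w) (hm : 0 < m)
    (hs : s + (w-1) ≤ m-1) :
    max (rightSpec e w m s) (leftSpec e w (s+(w-1))) ≤ c
      ↔ ∀ j, s ≤ j → j ≤ s + (w-1) → e j ≤ c := by
  have hr : s % w < w := Nat.mod_lt _ hw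
  have hsw : s + (w-1) = s + w - 1 := by omega
  have hb : (s + w - 1) % w = if s % w = 0 then w - 1 else s % w - 1 := shift_mod w s hw
  rw [max_le_iff, rightSpec_eq_segMax e w m s hw hm (by omega),
      leftSpec_eq_segMax e w (s+(w-1)), segMax_le_iff, segMax_le_iff]
  constructor
  · rintro ⟨hR, hL⟩ j hj1 hj2
    by_cases hcase : j ≤ s + (w-1) - s % w
    · exact hR j hj1 (by omega)
    · have hr0 : s % w ≠ 0 := by omega
      rw [hsw] at hL
      rw [hb, if_neg hr0] at hL
      apply hL <;> omega
  · intro h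
    constructor
    · intro j hj1 hj2
      exact h j hj1 (by omega)
    · intro j hj1 hj2
      rw [hsw] at hj1 hj2
      rw [hb] at hj1 hj2
      by_cases hr0 : s % w = 0
      · rw [if_pos hr0] at hj1 hj2
        exact h j (by omega) (by omega)
      · rw [if_neg hr0] at hj1 hj2
        exact h j (by omega) (by omega)

theorem getD_set (l : List Int) (n : Nat) (a : Int) (m : Nat) :
    (l.set n a).getD m 0 = if n = m ∧ n < l.length then a else l.getD m 0 := by
  simp only [List.getD, List.getElem?_set]
  split_ifs with h1 h2 h3 <;> simp_all
  omega

theorem left_fold (ext : List Int) (w : Int) (hw : 0 < w) (k : Nat) (hk : k < ext.length) :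
    ((PySem.List.pyRange 1 ((k : Int) + 1) 1).foldl
      (fun l i => if PySem.Int.mod i w ≠ 0 then
          PySem.List.pySetD l i (max (PySem.List.pyGetD l (i - 1) 0) (PySem.List.pyGetD ext i 0))
        else l) ext).length = ext.length ∧
    ∀ i, i < ext.length →
      ((PySem.List.pyRange 1 ((k : Int) + 1) 1).foldl
        (fun l i => if PySem.Int.mod i w ≠ 0 then
            PySem.List.pySetD l i (max (PySem.List.pyGetD l (i - 1) 0) (PySem.List.pyGetD ext i 0))
          else l) ext).getD i 0 =
      if i ≤ k then leftSpec (fun t => ext.getD t 0) w.toNat i else ext.getD i 0 := by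
  induction k with
  | zero =>
    rw [PySem.List.pyRange_one_eq_nil (by norm_num)]
    simp only [List.foldl_nil]
    constructor
    · trivial
    · intro i hi
      rcases Nat.eq_zero_or_pos i with h0 | h0
      · subst h0; simp [leftSpec]
      · rw [if_neg (by omega)]
  | succ k ih =>
    obtain ⟨ihlen, ihval⟩ := ih (by omega)
    have hsplit : PySem.List.pyRange 1 ((k : Int) + 1 + 1) 1
        = PySem.List.pyRange 1 ((k : Int) + 1) 1 ++ [(k : Int) + 1] :=
      PySem.List.pyRange_one_succ_right (by omega)
    push_cast
    rw [hsplit, List.foldl_append, List.foldl_cons, List.foldl_nil]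
    set L := (PySem.List.pyRange 1 ((k : Int) + 1) 1).foldl
        (fun l i => if PySem.Int.mod i w ≠ 0 then
            PySem.List.pySetD l i (max (PySem.List.pyGetD l (i - 1) 0) (PySem.List.pyGetD ext i 0))
          else l) ext with hL
    have hwc : w = ((w.toNat : Nat) : Int) := by omega
    have hmod : PySem.Int.mod ((k : Int) + 1) w = (((k+1) % w.toNat : Nat) : Int) := by
      have h1 : (k : Int) + 1 = ((k+1 : Nat) : Int) := by push_cast; ring
      rw [h1, hwc, PySem.Int.mod_natCast]
      simp
    by_cases hz : (k+1) % w.toNat = 0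
    · rw [hmod, if_neg (by simp only [ne_eq, Int.natCast_eq_zero, not_not]; exact hz)]
      refine ⟨ihlen, fun i hi => ?_⟩
      rcases Nat.lt_or_ge i (k+1) with hik | hik
      · rw [ihval i hi, if_pos (by omega), if_pos (by omega)]
      · rcases Nat.eq_or_lt_of_le hik with heq | hlt
        · subst heq
          rw [ihval _ hi, if_neg (by omega), if_pos (by omega)]
          simp only [leftSpec, hz]
          simp
        · rw [ihval i hi, if_neg (by omega), if_neg (by omega)]
    · rw [hmod, if_pos (by simp only [ne_eq, Int.natCast_eq_zero]; exact hz)]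
      have hget1 : PySem.List.pyGetD L ((k : Int) + 1 - 1) 0 = L.getD k 0 := by
        have h1 : (k : Int) + 1 - 1 = (k : Int) := by ring
        rw [h1, PySem.List.pyGetD_natCast]
      have hget2 : PySem.List.pyGetD ext ((k : Int) + 1) 0 = ext.getD (k+1) 0 := by
        have h1 : (k : Int) + 1 = ((k+1 : Nat) : Int) := by push_cast; ring
        rw [h1, PySem.List.pyGetD_natCast]
      have hset : PySem.List.pySetD L ((k : Int) + 1)
            (max (PySem.List.pyGetD L ((k : Int) + 1 - 1) 0) (PySem.List.pyGetD ext ((k : Int) + 1) 0))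
          = L.set (k+1) (max (L.getD k 0) (ext.getD (k+1) 0)) := by
        rw [hget1, hget2]
        have h1 : (k : Int) + 1 = ((k+1 : Nat) : Int) := by push_cast; ring
        rw [h1, PySem.List.pySetD_natCast]
      rw [hset]
      constructor
      · rw [List.length_set, ihlen]
      · intro i hi
        rw [getD_set]
        rcases Nat.lt_or_ge i (k+1) with hik | hik
        · rw [if_neg (by omega), ihval i hi, if_pos (by omega), if_pos (by omega)]
        · rcases Nat.eq_or_lt_of_le hik with heq | hlt
          · subst heq
            rw [if_pos ⟨rfl, by omega⟩, if_pos (by omega)]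
            rw [ihval k (by omega), if_pos (by omega)]
            simp only [leftSpec]
            rw [if_pos hz]
          · rw [if_neg (by omega), ihval i hi, if_neg (by omega), if_neg (by omega)]

theorem countdown_eq (M : Nat) :
    PySem.List.pyRange ((M : Int) - 2) (-1) (-1)
      = (PySem.List.pyRange 0 ((M : Int) - 1) 1).reverse := by
  rw [PySem.List.pyRange_neg_one, PySem.List.pyRange_one]
  apply List.ext_getElem
  · simp
    omega
  · intro k h1 h2
    simp only [List.getElem_map, List.getElem_range, List.getElem_reverse, List.length_map,
      List.length_range]
    simp only [List.length_map, List.length_range] at h1 h2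
    omega

theorem right_fold (ext : List Int) (w : Int) (hw : 0 < w) (hm : 0 < ext.length) :
    ∀ (d : Nat) (a : Nat), ext.length - 1 - a = d →
    ((PySem.List.pyRange (a : Int) ((ext.length : Int) - 1) 1).foldr
      (fun i acc => if PySem.Int.mod (i + 1) w ≠ 0 then
          PySem.List.pySetD acc i (max (PySem.List.pyGetD acc (i + 1) 0) (PySem.List.pyGetD ext i 0))
        else acc) ext).length = ext.length ∧
    ∀ i, i < ext.length →
      ((PySem.List.pyRange (a : Int) ((ext.length : Int) - 1) 1).foldr
        (fun i acc => if PySem.Int.mod (i + 1) w ≠ 0 then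
            PySem.List.pySetD acc i (max (PySem.List.pyGetD acc (i + 1) 0) (PySem.List.pyGetD ext i 0))
          else acc) ext).getD i 0 =
      if a ≤ i then rightSpec (fun t => ext.getD t 0) w.toNat ext.length i else ext.getD i 0 := by
  intro d
  induction d with
  | zero =>
    intro a ha
    rw [PySem.List.pyRange_one_eq_nil (by omega)]
    simp only [List.foldr_nil]
    refine ⟨trivial, fun i hi => ?_⟩
    by_cases h : a ≤ i
    · rw [if_pos h]
      have hieq : i = ext.length - 1 := by omega
      subst hieq
      have : ext.length - 1 - (ext.length - 1) = 0 := by omega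
      rw [rightSpec, this]
      rfl
    · rw [if_neg h]
  | succ d ih =>
    intro a ha
    have hsplit : PySem.List.pyRange (a : Int) ((ext.length : Int) - 1) 1
        = (a : Int) :: PySem.List.pyRange ((a : Int) + 1) ((ext.length : Int) - 1) 1 :=
      PySem.List.pyRange_one_cons (by omega)
    have hcast : (a : Int) + 1 = ((a+1 : Nat) : Int) := by push_cast; ring
    rw [hsplit, List.foldr_cons, hcast]
    obtain ⟨ihlen, ihval⟩ := ih (a+1) (by omega)
    set R := (PySem.List.pyRange ((a+1 : Nat) : Int) ((ext.length : Int) - 1) 1).foldr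
        (fun i acc => if PySem.Int.mod (i + 1) w ≠ 0 then
            PySem.List.pySetD acc i (max (PySem.List.pyGetD acc (i + 1) 0) (PySem.List.pyGetD ext i 0))
          else acc) ext with hR
    have hwc : w = ((w.toNat : Nat) : Int) := by omega
    have hmod : PySem.Int.mod (((a+1 : Nat) : Int)) w = (((a+1) % w.toNat : Nat) : Int) := by
      rw [hwc, PySem.Int.mod_natCast]
      simp
    have he1 : ext.length - 1 - d = a + 1 := by omega
    have he2 : ext.length - 2 - d = a := by omega
    have hrs : rightSpec (fun t => ext.getD t 0) w.toNat ext.length a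
        = if (a+1) % w.toNat ≠ 0 then
            max (rightSpec (fun t => ext.getD t 0) w.toNat ext.length (a+1)) (ext.getD a 0)
          else ext.getD a 0 := by
      have hga : ext.length - 1 - a = d + 1 := ha
      have hga1 : ext.length - 1 - (a+1) = d := by omega
      rw [rightSpec, rightSpec, hga, hga1]
      show (if (ext.length-1-d) % w.toNat ≠ 0 then
          max (rightSpecG (fun t => ext.getD t 0) w.toNat ext.length d) ((fun t => ext.getD t 0) (ext.length-2-d))
        else (fun t => ext.getD t 0) (ext.length-2-d)) = _
      rw [he1, he2]
    by_cases hz : (a+1) % w.toNat = 0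
    · rw [hmod, if_neg (by simp only [ne_eq, Int.natCast_eq_zero, not_not]; exact hz)]
      refine ⟨ihlen, fun i hi => ?_⟩
      by_cases h : a ≤ i
      · rcases Nat.eq_or_lt_of_le h with heq | hlt
        · subst heq
          rw [ihval a hi, if_neg (by omega), if_pos le_rfl, hrs, if_neg (by simpa using hz)]
        · rw [ihval i hi, if_pos (by omega), if_pos h]
      · rw [ihval i hi, if_neg (by omega), if_neg h]
    · rw [hmod, if_pos (by simp only [ne_eq, Int.natCast_eq_zero]; exact hz)]
      have hget1 : PySem.List.pyGetD R (((a+1 : Nat) : Int)) 0 = R.getD (a+1) 0 := by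
        rw [PySem.List.pyGetD_natCast]
      have hget2 : PySem.List.pyGetD ext (a : Int) 0 = ext.getD a 0 := PySem.List.pyGetD_natCast ..
      have hset : PySem.List.pySetD R (a : Int)
            (max (PySem.List.pyGetD R (((a+1 : Nat) : Int)) 0) (PySem.List.pyGetD ext (a : Int) 0))
          = R.set a (max (R.getD (a+1) 0) (ext.getD a 0)) := by
        rw [hget1, hget2, PySem.List.pySetD_natCast]
      rw [hset]
      refine ⟨by rw [List.length_set, ihlen], fun i hi => ?_⟩
      rw [getD_set]
      by_cases h : a ≤ i
      · rcases Nat.eq_or_lt_of_le h with heq | hlt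
        · subst heq
          rw [if_pos ⟨rfl, by omega⟩, if_pos le_rfl, hrs, if_pos (by simpa using hz)]
          rw [ihval (a+1) (by omega), if_pos le_rfl]
        · rw [if_neg (by omega), ihval i hi, if_pos (by omega), if_pos h]
      · rw [if_neg (by omega), ihval i hi, if_neg (by omega), if_neg h]

theorem gmbCheck_iff (content : List Int) (idx : Int) (js : List Int) :
    gmbCheck content idx js = true
      ↔ ∀ j ∈ js, PySem.List.pyGetD content (PySem.Int.mod (idx + j) (PySem.List.len content)) 0
          ≤ PySem.List.pyGetD content idx 0 := by
  induction js with
  | nil => simp [gmbCheck]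
  | cons j rest ih =>
    simp only [gmbCheck, List.mem_cons]
    split_ifs with h
    · simp only [false_iff]
      push Not
      exact ⟨j, Or.inl rfl, by omega⟩
    · rw [ih]
      constructor
      · rintro hall x (rfl | hx)
        · omega
        · exact hall x hx
      · intro hall x hx
        exact hall x (Or.inr hx)

-- selection: [sorted[-i] for i in 1..num] = reversed(sorted)[:max(0,num)]
theorem take_rev_eq (l : List (Int × Int)) (num : Int) (h : num ≤ (l.length : Int)) :
    (PySem.List.pyRange 1 (num + 1) 1).map
        (fun i => PySem.List.pyGetD l (-i) ((0 : Int), (0 : Int)))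
      = PySem.List.slice l.reverse none (some (max 0 num)) := by
  rcases le_or_gt num 0 with hn | hn
  · rw [PySem.List.pyRange_one_eq_nil (by omega)]
    have h0 : max 0 num = ((0 : Nat) : Int) := by simp; omega
    rw [h0, PySem.List.slice_to_natCast]
    simp
  · have hmax : max 0 num = ((num.toNat : Nat) : Int) := by simp; omega
    rw [hmax, PySem.List.slice_to_natCast, PySem.List.pyRange_one]
    apply List.ext_getElem
    · simp
      omega
    · intro k h1 h2
      simp only [List.length_map, List.length_range] at h1
      have hk : k < num.toNat := by omega
      have hkl : k < l.length := by omega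
      simp only [List.getElem_map, List.getElem_range, List.getElem_take, List.getElem_reverse]
      have hcast : -(1 + (k : Int)) = -(((k+1 : Nat) : Nat) : Int) := by push_cast; ring
      rw [hcast, PySem.List.pyGetD_neg_natCast _ _ _ (by omega) (by omega)]
      exact getElem_congr rfl (by omega) (by omega)

theorem negRange_succ (t : Int) (fuel : Nat) :
    (List.range (fuel+1)).map (fun (j : Nat) => (t - (j : Int), (0 : Int)))
      = (t, 0) :: (List.range fuel).map (fun (j : Nat) => (t - 1 - (j : Int), (0 : Int))) := by
  rw [List.range_succ_eq_map, List.map_cons, List.map_map]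
  congr 1
  · norm_num
  · apply List.map_congr_left
    intro j _
    simp only [Function.comp_apply]
    congr 1
    push_cast
    ring

-- padding loop appends fresh negative keys
theorem gmbPad_items (num : Int) : ∀ (fuel : Nat) (d : PySem.Dict Int Int) (t : Int),
    (∀ k ∈ d.keys, t < k) → ((d.size : Int) + fuel = num) →
    (gmbPad num d t fuel).items
      = d.items ++ (List.range fuel).map (fun (j : Nat) => (t - (j : Int), (0 : Int))) := by
  intro fuel
  induction fuel with
  | zero => intro d t _ _; simp [gmbPad]
  | succ fuel ih =>
    intro d t hfresh hsize
    have hlt : (d.size : Int) < num := by omega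
    show (if (d.size : Int) < num then gmbPad num (d.insert t 0) (t-1) fuel else d).items = _
    rw [if_pos hlt]
    have hnc : d.contains t = false := by
      rw [← Bool.not_eq_true, PySem.Dict.contains_iff_mem_keys]
      intro hmem
      exact lt_irrefl t (hfresh t hmem)
    have hitems := PySem.Dict.items_insert_of_not_contains d (0 : Int) hnc
    have hsize' : ((d.insert t 0).size : Int) + fuel = num := by
      have hlen : (d.insert t 0).size = d.size + 1 := by
        show (d.insert t 0).items.length = d.items.length + 1
        rw [hitems, List.length_append, List.length_cons]
        rfl
      omega
    have hfresh' : ∀ k ∈ (d.insert t 0).keys, t - 1 < k := by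
      intro k hk
      rcases (PySem.Dict.mem_keys_insert d t k 0).mp hk with rfl | hk'
      · omega
      · have := hfresh k hk'; omega
    rw [ih (d.insert t 0) (t-1) hfresh' hsize', hitems, List.append_assoc, negRange_succ]
    rfl

-- phase 1: the peak dict's items
theorem phase1_items (content : List Int) (scope : Int) :
    ((PySem.List.pyRange 0 (PySem.List.len content) 1).foldl
      (fun d idx =>
        if gmbCheck content idx (PySem.List.pyRange (-scope) (scope + 1) 1) then
          d.insert idx (PySem.List.pyGetD content idx 0)
        else d)
      PySem.Dict.empty).items
    = ((PySem.List.pyRange 0 (PySem.List.len content) 1).filter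
        (fun idx => gmbCheck content idx (PySem.List.pyRange (-scope) (scope + 1) 1))).map
        (fun idx => (idx, PySem.List.pyGetD content idx 0)) := by
  have h := PySem.List.foldl_if_eq_foldl_filter
    (fun idx => gmbCheck content idx (PySem.List.pyRange (-scope) (scope + 1) 1))
    (fun (d : PySem.Dict Int Int) idx => d.insert idx (PySem.List.pyGetD content idx 0))
    (PySem.List.pyRange 0 (PySem.List.len content) 1) PySem.Dict.empty
  rw [h]
  rw [PySem.Dict.items_foldl_insert_fresh _ (fun idx => idx) _ _
    (fun a _ => PySem.Dict.contains_empty a)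
    (by simpa using ((PySem.List.nodup_pyRange_one 0 (PySem.List.len content)).filter _))]
  simp
  rfl

-- the circularly extended array of B
def extB (content : List Int) (scope : Int) : List Int :=
  (PySem.List.pyRange 0 (PySem.List.len content + 2 * scope) 1).map
    (fun t => PySem.List.pyGetD content (PySem.Int.mod (t - scope) (PySem.List.len content)) 0)

theorem extB_length (content : List Int) (scope : Int) (hs : 0 ≤ scope) :
    (extB content scope).length = content.length + 2 * scope.toNat := by
  rw [extB, List.length_map, PySem.List.len_eq, PySem.List.length_pyRange_one]
  omega

theorem extB_getD (content : List Int) (scope : Int) (hs : 0 ≤ scope) (t : Nat)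
    (ht : t < content.length + 2 * scope.toNat) :
    (extB content scope).getD t 0
      = PySem.List.pyGetD content (PySem.Int.mod ((t : Int) - scope) (PySem.List.len content)) 0 := by
  have hcast : PySem.List.len content + 2 * scope
      = ((content.length + 2 * scope.toNat : Nat) : Int) := by
    rw [PySem.List.len_eq]; omega
  rw [extB, List.getD, hcast, PySem.List.getElem?_map_pyRange_zero _ _ _ ht]
  rfl

theorem peaks_bridge (content : List Int) (scope : Int)
    (hn : 0 < content.length) (hs : 0 ≤ scope)
    (left right : List Int)
    (hLval : ∀ i, i < content.length + 2 * scope.toNat →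
      left.getD i 0 = leftSpec (fun t => (extB content scope).getD t 0) (2*scope+1).toNat i)
    (hRval : ∀ i, i < content.length + 2 * scope.toNat →
      right.getD i 0 = rightSpec (fun t => (extB content scope).getD t 0) (2*scope+1).toNat
        (content.length + 2 * scope.toNat) i)
    (idx : Int) (hmem : idx ∈ PySem.List.pyRange 0 (PySem.List.len content) 1) :
    decide (max (PySem.List.pyGetD right idx 0)
        (PySem.List.pyGetD left (idx + (2 * scope + 1) - 1) 0)
      ≤ PySem.List.pyGetD content idx 0)
    = gmbCheck content idx (PySem.List.pyRange (-scope) (scope + 1) 1) := by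
  have hmem' := PySem.List.mem_pyRange_one.mp hmem
  rw [PySem.List.len_eq] at hmem'
  set n' := content.length with hn'
  set s' := scope.toNat with hs'
  set w' := 2 * s' + 1 with hw'
  set m' := n' + 2 * s' with hm'
  set e := fun t => (extB content scope).getD t 0 with he
  have hscast : scope = (s' : Int) := by omega
  have hwt : (2 * scope + 1).toNat = w' := by omega
  set i := idx.toNat with hi
  have hidx : idx = (i : Int) := by omega
  have hiw : idx + (2 * scope + 1) - 1 = ((i + w' - 1 : Nat) : Int) := by
    omega
  -- reduce the two pyGetD's
  have hR : PySem.List.pyGetD right idx 0 = rightSpec e w' m' i := by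
    rw [hidx, PySem.List.pyGetD_natCast, hRval i (by omega), hwt]
  have hL : PySem.List.pyGetD left (idx + (2 * scope + 1) - 1) 0 = leftSpec e w' (i + w' - 1) := by
    rw [hiw, PySem.List.pyGetD_natCast, hLval (i + w' - 1) (by omega), hwt]
  rw [hR, hL]
  -- turn both sides into propositions
  rw [Bool.eq_iff_iff, decide_eq_true_iff, gmbCheck_iff]
  have hwin := window_le_iff e w' m' i (PySem.List.pyGetD content idx 0)
    (by omega) (by omega) (by omega)
  have hww : i + w' - 1 = i + (w' - 1) := by omega
  rw [hww, hwin]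
  -- index correspondence
  have hext : ∀ t : Nat, t < m' → e t
      = PySem.List.pyGetD content (PySem.Int.mod ((t : Int) - scope) (PySem.List.len content)) 0 :=
    fun t ht => extB_getD content scope hs t ht
  constructor
  · intro hB j hj
    have hj' := PySem.List.mem_pyRange_one.mp hj
    set t := (idx + j + scope).toNat with htd
    have htc : (t : Int) = idx + j + scope := by omega
    have h1 : i ≤ t := by omega
    have h2 : t ≤ i + (w' - 1) := by omega
    have := hB t h1 h2
    rw [hext t (by omega)] at this
    have harg : (t : Int) - scope = idx + j := by omega
    rw [harg] at this
    exact this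
  · intro hA t h1 h2
    rw [hext t (by omega)]
    have harg : (t : Int) - scope = idx + ((t : Int) - (i : Int) - scope) := by omega
    rw [harg]
    apply hA
    rw [PySem.List.mem_pyRange_one]
    omega

theorem sel_eq {γ : Type} (items : List (Int × Int)) (num : Int)
    (h : num ≤ (items.length : Int)) (f : Int × Int → γ) :
    (PySem.List.pyRange 1 (num + 1) 1).map
        (fun i => f (PySem.List.pyGetD (PySem.List.sorted items (fun kv => kv.2) false) (-i) ((0:Int),(0:Int))))
      = (PySem.List.slice (PySem.List.sorted items (fun kv => kv.2) false).reverse none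
          (some (max 0 num))).map f := by
  have h' : num ≤ ((PySem.List.sorted items (fun kv => kv.2) false).length : Int) := by
    rw [PySem.List.length_sorted]; exact h
  rw [← take_rev_eq _ _ h', List.map_map]
  rfl

theorem padList_eq (P : List (Int × Int)) (num : Int) :
    (PySem.List.pyRange 1 ((num - PySem.List.len P) + 1) 1).map (fun t => (-t, (0:Int)))
      = (List.range (num - (P.length : Int)).toNat).map
          (fun (j : Nat) => (-1 - (j : Int), (0:Int))) := by
  rw [PySem.List.len_eq, PySem.List.pyRange_one, List.map_map]
  have he : (num - (P.length : Int) + 1 - 1).toNat = (num - (P.length : Int)).toNat := by omega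
  rw [he]
  apply List.map_congr_left
  intro j _
  simp only [Function.comp_apply]
  congr 1
  ring

theorem max_bridge (content : List Int) (scope : Int)
    (hn : 0 < content.length)
    (hw : 2 * scope + 1 ≥ PySem.List.len content)
    (idx : Int) (hmem : idx ∈ PySem.List.pyRange 0 (PySem.List.len content) 1) :
    decide ((PySem.List.max? content (fun x => x)).getD 0 ≤ PySem.List.pyGetD content idx 0)
      = gmbCheck content idx (PySem.List.pyRange (-scope) (scope + 1) 1) := by
  have hmem' := PySem.List.mem_pyRange_one.mp hmem
  rw [PySem.List.len_eq] at hmem' hw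
  have hne : content ≠ [] := by
    intro h; rw [h] at hn; simp at hn
  obtain ⟨mx, hmx⟩ : ∃ mx, PySem.List.max? content (fun x => x) = some mx := by
    rcases h : PySem.List.max? content (fun x => x) with _ | mx
    · exact absurd ((PySem.List.max?_eq_none_iff content (fun x => x)).mp h) hne
    · exact ⟨mx, rfl⟩
  have hmax : ∀ y ∈ content, y ≤ mx := PySem.List.max?_isMax hmx
  have hmxmem : mx ∈ content := PySem.List.max?_mem hmx
  rw [hmx, Bool.eq_iff_iff, decide_eq_true_iff, gmbCheck_iff]
  simp only [Option.getD_some]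
  have hnpos : (0 : Int) < (content.length : Int) := by exact_mod_cast hn
  constructor
  · intro hle j hj
    have hin : PySem.Raise.InRange content.length
        (PySem.Int.mod (idx + j) (PySem.List.len content)) := by
      rw [PySem.List.len_eq]
      constructor
      · have := PySem.Int.mod_nonneg (idx + j) hnpos; omega
      · exact PySem.Int.mod_lt (idx + j) hnpos
    exact le_trans (hmax _ (PySem.List.pyGetD_mem content 0 hin)) hle
  · intro hall
    obtain ⟨k, hk, hkm⟩ := List.mem_iff_getElem.mp hmxmem
    have hgk : PySem.List.pyGetD content ((k : Nat) : Int) 0 = mx := by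
      rw [PySem.List.pyGetD_natCast, List.getD_eq_getElem _ _ hk, hkm]
    -- choose a window offset j with (idx + j) % n = k
    have hmain : ∀ j : Int, -scope ≤ j → j < scope + 1 →
        (idx + j) % (content.length : Int) = (k : Int) →
        mx ≤ PySem.List.pyGetD content idx 0 := by
      intro j h1 h2 hmod
      have := hall j (PySem.List.mem_pyRange_one.mpr ⟨h1, h2⟩)
      rw [PySem.List.len_eq, PySem.Int.mod_eq_emod_of_pos hnpos, hmod, hgk] at this
      exact this
    rcases le_or_gt (-scope) ((k : Int) - idx) with hlo | hlo
    · rcases lt_or_ge ((k : Int) - idx) (scope + 1) with hhi | hhi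
      · -- j = k - idx
        apply hmain ((k : Int) - idx) hlo hhi
        rw [show idx + ((k : Int) - idx) = (k : Int) from by ring]
        exact Int.emod_eq_of_lt (by omega) (by exact_mod_cast hk)
      · -- j = k - idx - n
        apply hmain ((k : Int) - idx - (content.length : Int)) (by omega) (by omega)
        rw [show idx + ((k : Int) - idx - (content.length : Int))
            = (k : Int) - (content.length : Int) from by ring]
        rw [Int.sub_emod_right]
        exact Int.emod_eq_of_lt (by omega) (by exact_mod_cast hk)
    · -- j = k - idx + n
      apply hmain ((k : Int) - idx + (content.length : Int)) (by omega) (by omega)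
      rw [show idx + ((k : Int) - idx + (content.length : Int))
          = (k : Int) + (content.length : Int) from by ring]
      rw [Int.add_emod_right]
      exact Int.emod_eq_of_lt (by omega) (by exact_mod_cast hk)

theorem peaks_eq (content : List Int) (scope : Int) :
    (if PySem.List.len content = 0 ∨ scope < 0 then PySem.List.enumerate content 0
     else if 2 * scope + 1 ≥ PySem.List.len content then
      (PySem.List.enumerate content 0).filter
        (fun p => decide ((PySem.List.max? content (fun x => x)).getD 0 ≤ p.2))
     else
      List.filter
        (fun p =>
          decide
            (max
                (PySem.List.pyGetD
                  (List.foldl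
                    (fun r i =>
                      if PySem.Int.mod (i + 1) (2 * scope + 1) ≠ 0 then
                        PySem.List.pySetD r i
                          (max (PySem.List.pyGetD r (i + 1) 0) (PySem.List.pyGetD (extB content scope) i 0))
                      else r)
                    (extB content scope)
                    (PySem.List.pyRange (PySem.List.len (extB content scope) - 2) (-1) (-1)))
                  p.1 0)
                (PySem.List.pyGetD
                  (List.foldl
                    (fun l i =>
                      if PySem.Int.mod i (2 * scope + 1) ≠ 0 then
                        PySem.List.pySetD l i
                          (max (PySem.List.pyGetD l (i - 1) 0) (PySem.List.pyGetD (extB content scope) i 0))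
                      else l)
                    (extB content scope) (PySem.List.pyRange 1 (PySem.List.len (extB content scope)) 1))
                  (p.1 + (2 * scope + 1) - 1) 0) ≤
              p.2))
        (PySem.List.enumerate content 0))
    = ((PySem.List.pyRange 0 (PySem.List.len content) 1).filter
        (fun idx => gmbCheck content idx (PySem.List.pyRange (-scope) (scope + 1) 1))).map
        (fun idx => (idx, PySem.List.pyGetD content idx 0)) := by
  by_cases hc : PySem.List.len content = 0 ∨ scope < 0
  · rw [if_pos hc]
    rw [PySem.List.enumerate_eq_map_pyRange content 0]
    rcases hc with hc | hc
    · rw [hc, PySem.List.pyRange_one_eq_nil le_rfl]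
      simp
    · have hall : ∀ idx ∈ PySem.List.pyRange 0 (PySem.List.len content) 1,
          gmbCheck content idx (PySem.List.pyRange (-scope) (scope + 1) 1) = true := by
        intro idx _
        rw [PySem.List.pyRange_one_eq_nil (by omega)]
        rfl
      rw [List.filter_eq_self.mpr hall]
  · push Not at hc
    obtain ⟨hlen0, hsc⟩ := hc
    have hs : 0 ≤ scope := by omega
    have hn : 0 < content.length := by
      rw [PySem.List.len_eq] at hlen0
      omega
    rw [if_neg (by push Not; exact ⟨hlen0, hsc⟩)]
    by_cases hwn : 2 * scope + 1 ≥ PySem.List.len content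
    · rw [if_pos hwn]
      rw [PySem.List.enumerate_eq_map_pyRange content 0, List.filter_map]
      apply congrArg
      apply List.filter_congr
      intro idx hidx
      simp only [Function.comp_apply]
      exact max_bridge content scope hn hwn idx hidx
    rw [if_neg hwn]
    set m' := content.length + 2 * scope.toNat with hm'
    have hm1 : 0 < m' := by omega
    have hextlen : (extB content scope).length = m' := extB_length content scope hs
    have hlenext : PySem.List.len (extB content scope) = ((m' - 1 : Nat) : Int) + 1 := by
      rw [PySem.List.len_eq, hextlen]; omega
    -- left fold characterisation
    obtain ⟨hLlen, hLval⟩ := left_fold (extB content scope) (2 * scope + 1) (by omega)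
      (m' - 1) (by omega)
    rw [← hlenext] at hLval
    -- right fold characterisation
    have hcountdown : PySem.List.pyRange (PySem.List.len (extB content scope) - 2) (-1) (-1)
        = (PySem.List.pyRange ((0 : Nat) : Int) ((((extB content scope).length : Nat) : Int) - 1) 1).reverse := by
      rw [PySem.List.len_eq, hextlen]
      push_cast
      rw [show ((m' : Int) - 2) = ((m' : Nat) : Int) - 2 from by norm_num]
      rw [countdown_eq m']
    obtain ⟨hRlen, hRval⟩ := right_fold (extB content scope) (2 * scope + 1) (by omega)
      (by omega) (m' - 1) 0 (by omega)
    rw [hcountdown, List.foldl_reverse]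
    rw [PySem.List.enumerate_eq_map_pyRange content 0, List.filter_map]
    apply congrArg
    apply List.filter_congr
    intro idx hidx
    simp only [Function.comp_apply]
    apply peaks_bridge content scope hn hs
    · intro i hi
      rw [hLval i (by omega), if_pos (by omega)]
    · intro i hi
      rw [hRval i (by omega), if_pos (by omega), hextlen]
    · exact hidx

theorem get_max_bins_eq (content : List Int) (scope : Int) (num : Int) :
    get_max_bins content scope num = get_max_bins_alt content scope num := by
  simp only [get_max_bins, get_max_bins_alt]
  rw [show (List.map
      (fun t => PySem.List.pyGetD content (PySem.Int.mod (t - scope) (PySem.List.len content)) 0)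
      (PySem.List.pyRange 0 (PySem.List.len content + 2 * scope) 1)) = extB content scope from rfl]
  rw [peaks_eq content scope]
  set P : PySem.Dict Int Int := (PySem.List.pyRange 0 (PySem.List.len content) 1).foldl
      (fun d idx =>
        if gmbCheck content idx (PySem.List.pyRange (-scope) (scope + 1) 1) then
          d.insert idx (PySem.List.pyGetD content idx 0)
        else d)
      PySem.Dict.empty with hPdef
  have hitems : P.items = ((PySem.List.pyRange 0 (PySem.List.len content) 1).filter
      (fun idx => gmbCheck content idx (PySem.List.pyRange (-scope) (scope + 1) 1))).map
      (fun idx => (idx, PySem.List.pyGetD content idx 0)) := phase1_items content scope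
  have hkeys : ∀ k ∈ P.keys, (-1 : Int) < k := by
    intro k hk
    have : P.keys = P.items.map (·.1) := rfl
    rw [this, hitems] at hk
    simp only [List.map_map, List.mem_map] at hk
    obtain ⟨idx, hidx, rfl⟩ := hk
    have := PySem.List.mem_pyRange_one.mp (List.mem_of_mem_filter hidx)
    simp only [Function.comp_apply]
    omega
  have hsize : P.size = ((PySem.List.pyRange 0 (PySem.List.len content) 1).filter
      (fun idx => gmbCheck content idx (PySem.List.pyRange (-scope) (scope + 1) 1))).length := by
    show P.items.length = _
    rw [hitems, List.length_map]
  have hpadded : (gmbPad num P (-1) (num - (P.size : Int)).toNat).items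
      = P.items ++ (List.range (num - (P.size : Int)).toNat).map
          (fun (j : Nat) => ((-1 : Int) - (j : Int), (0 : Int))) := by
    rcases le_or_gt num (P.size : Int) with hle | hgt
    · rw [show (num - (P.size : Int)).toNat = 0 from by omega]
      simp [gmbPad]
    · exact gmbPad_items num _ P (-1) hkeys (by omega)
  rw [hpadded, hitems, padList_eq, hsize]
  set F := ((PySem.List.pyRange 0 (PySem.List.len content) 1).filter
      (fun idx => gmbCheck content idx (PySem.List.pyRange (-scope) (scope + 1) 1))).map
      (fun idx => (idx, PySem.List.pyGetD content idx 0)) with hFdef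
  set ITEMS := F ++ (List.range (num - (((PySem.List.pyRange 0 (PySem.List.len content) 1).filter
      (fun idx => gmbCheck content idx (PySem.List.pyRange (-scope) (scope + 1) 1))).length : Int)).toNat).map
      (fun (j : Nat) => ((-1 : Int) - (j : Int), (0 : Int))) with hITEMS
  have hFlen : F.length = ((PySem.List.pyRange 0 (PySem.List.len content) 1).filter
      (fun idx => gmbCheck content idx (PySem.List.pyRange (-scope) (scope + 1) 1))).length :=
    List.length_map ..
  have hnum : num ≤ (ITEMS.length : Int) := by
    rw [hITEMS]
    simp only [List.length_append, List.length_map, List.length_range]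
    omega
  rw [sel_eq ITEMS num hnum Prod.fst, sel_eq ITEMS num hnum Prod.snd, hFlen, ← hITEMS]

-- ===== VERDICT (by name: the statement is the Claim_ definition above) =====
theorem get_max_bins_spec : Claim_equal_get_max_bins := by
  intro content scope num _
  unfold Spec_get_max_bins
  exact get_max_bins_eq content scope num
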